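-- pv_equiv track=rewrite | github.com/GP-data-engineer/Introduction-to-Algorithms-clrs-exercises | src/Chapter08/Exercise_8_3_5.py | simulate_radix_piles_decimal
-- ===== SOURCE A (Python) =====
-- def simulate_radix_piles_decimal(numbers: list, d: int):
--     """
--     Simulate LSD passes showing piles counts at each pass (only to illustrate).
--     """
--     piles_history = []
--     base = 10
--     A = list(numbers)
--     for pos in range(d):
--         piles = [[] for _ in range(base)]
--         for x in A:
--             digit = (x // (10 ** pos)) % 10
--             piles[digit].append(x)
--         piles_history.append([len(p) for p in piles])
--         # collect back
--         A = [x for bucket in piles for x in bucket]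
--     return piles_history
-- ===== SOURCE B (Python) =====
-- def simulate_radix_piles_decimal(numbers: list, d: int):
--     """Per-pass digit counts computed directly from the original list:
--     the counts of each pass do not depend on the ordering, so the
--     stable collect-back simulation is unnecessary."""
--     def counts(pos):
--         c = [0] * 10
--         for x in numbers:
--             c[(x // 10 ** pos) % 10] += 1
--         return c
--     return [counts(pos) for pos in range(d)]
-- ===== Notes on version B (the rewrite author's own statement) =====
-- stated objective: simpler
-- what changed: B drops the maintained working array and the per-pass stable collect-back entirely: each pass's counts are computed by one direct counting loop over the original input (bucket counts are permutation-invariant), instead of building ten piles of elements, taking their lengths and flattening them back.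
import Mathlib
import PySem

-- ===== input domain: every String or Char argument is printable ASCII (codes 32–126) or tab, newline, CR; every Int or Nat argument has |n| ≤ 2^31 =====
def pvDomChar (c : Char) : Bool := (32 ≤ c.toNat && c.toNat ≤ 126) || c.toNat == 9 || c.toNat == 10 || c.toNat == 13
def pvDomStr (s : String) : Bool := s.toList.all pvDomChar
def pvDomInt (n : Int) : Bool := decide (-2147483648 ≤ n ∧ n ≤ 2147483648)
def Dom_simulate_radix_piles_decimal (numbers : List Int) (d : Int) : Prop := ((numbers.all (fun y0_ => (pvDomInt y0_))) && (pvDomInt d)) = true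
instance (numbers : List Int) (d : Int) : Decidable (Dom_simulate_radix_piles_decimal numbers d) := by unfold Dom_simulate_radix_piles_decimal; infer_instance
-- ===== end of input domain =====

-- ===== PORT A =====
-- B changes: each pass's counts are computed by one direct counting loop over the
-- original input instead of simulating the stable pile/collect-back rebuild (simpler).
-- shared helper: the decimal digit of x at position pos, exactly Python's (x // 10**pos) % 10
def pvDigit (pos x : Int) : Int :=
  PySem.Int.mod (PySem.Int.floordiv x ((10 : Int) ^ pos.toNat)) 10

def simulate_radix_piles_decimal (numbers : List Int) (d : Int) : List (List Int) :=
  -- piles_history = []; base = 10; A = list(numbers); for pos in range(d): …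
  let base : Nat := 10
  let res :=
    (PySem.List.pyRange 0 d 1).foldl
      (fun (st : List (List Int) × List Int) pos =>
        let piles : List (List Int) := (List.range base).map (fun _ => [])
        let piles := st.2.foldl
          (fun piles x => piles.modify (pvDigit pos x).toNat (fun b => b ++ [x])) piles
        (st.1 ++ [piles.map (fun p => (p.length : Int))], piles.flatten))
      ([], numbers)
  res.1

-- ===== PORT B =====
def pvCounts (numbers : List Int) (pos : Int) : List Int :=
  numbers.foldl (fun c x => c.modify (pvDigit pos x).toNat (· + 1)) (List.replicate 10 0)

def simulate_radix_piles_decimal_alt (numbers : List Int) (d : Int) : List (List Int) :=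
  (PySem.List.pyRange 0 d 1).map (pvCounts numbers)

-- ===== PRECONDITION & SPEC =====
def Spec_simulate_radix_piles_decimal (numbers : List Int) (d : Int) (out : List (List Int)) : Prop := out = simulate_radix_piles_decimal_alt numbers d
instance (numbers : List Int) (d : Int) (out : List (List Int)) : Decidable (Spec_simulate_radix_piles_decimal numbers d out) := by unfold Spec_simulate_radix_piles_decimal; infer_instance

-- ===== CLAIM (what is proved, stated in full; the proofs are below) =====
def Claim_equal_simulate_radix_piles_decimal : Prop := ∀ (numbers : List Int) (d : Int), Dom_simulate_radix_piles_decimal numbers d → Spec_simulate_radix_piles_decimal numbers d (simulate_radix_piles_decimal numbers d)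

-- ===== LEMMAS AND PROOFS =====

-- mapping over a modify, when g transports f to h
theorem pv_map_modify {α β : Type} (g : α → β) (f : α → α) (h : β → β)
    (hgf : ∀ a, g (f a) = h (g a)) :
    ∀ (l : List α) (i : Nat), (l.modify i f).map g = (l.map g).modify i h := by
  intro l
  induction l with
  | nil => intro i; simp
  | cons a t ih =>
    intro i
    cases i with
    | zero => simp [hgf]
    | succ n => simp [ih]

-- two modifies with commuting functions commute
theorem pv_modify_comm {α : Type} (f g : α → α) (hc : ∀ a, f (g a) = g (f a)) :
    ∀ (l : List α) (i j : Nat), (l.modify i f).modify j g = (l.modify j g).modify i f := by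
  intro l
  induction l with
  | nil => intro i j; simp
  | cons a t ih =>
    intro i j
    cases i with
    | zero =>
      cases j with
      | zero => simp [hc]
      | succ m => simp
    | succ n =>
      cases j with
      | zero => simp
      | succ m => simp [ih]

-- counting only looks at the multiset of the input
theorem pv_counts_perm (pos : Int) {L1 L2 : List Int} (hp : L1.Perm L2) :
    pvCounts L1 pos = pvCounts L2 pos := by
  unfold pvCounts
  exact @List.Perm.foldl_eq _ _ _ _ _
    ⟨fun c x y => pv_modify_comm _ _ (fun a => rfl) c (pvDigit pos x).toNat (pvDigit pos y).toNat⟩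
    hp _

-- the pass digit is in [0, 10)
theorem pv_digit_lt (pos x : Int) : (pvDigit pos x).toNat < 10 := by
  have h1 := PySem.Int.mod_nonneg (PySem.Int.floordiv x ((10 : Int) ^ pos.toNat)) (b := 10) (by norm_num)
  have h2 := PySem.Int.mod_lt (PySem.Int.floordiv x ((10 : Int) ^ pos.toNat)) (b := 10) (by norm_num)
  unfold pvDigit
  omega

-- flattening after an in-range append-modify is a permutation of appending
theorem pv_flatten_modify {α : Type} (x : α) :
    ∀ (l : List (List α)) (i : Nat), i < l.length →
      (l.modify i (fun b => b ++ [x])).flatten.Perm (l.flatten ++ [x]) := by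
  intro l
  induction l with
  | nil => intro i hi; simp at hi
  | cons a t ih =>
    intro i hi
    cases i with
    | zero =>
      simp only [List.modify_zero_cons, List.flatten_cons]
      have h : ([x] ++ t.flatten).Perm (t.flatten ++ [x]) := List.perm_append_comm
      simpa [List.append_assoc] using List.Perm.append_left a h
    | succ n =>
      simp only [List.modify_succ_cons, List.flatten_cons]
      have h := List.Perm.append_left a (ih n (by simpa using hi))
      simpa [List.append_assoc] using h

-- the flattened piles are a permutation of the processed elements
theorem pv_piles_flatten (pos : Int) (L : List Int) :
    ∀ (piles : List (List Int)), piles.length = 10 →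
      (L.foldl (fun piles x => piles.modify (pvDigit pos x).toNat (fun b => b ++ [x])) piles).flatten.Perm
        (piles.flatten ++ L) := by
  induction L with
  | nil => intro piles _; simp
  | cons x t ih =>
    intro piles hlen
    simp only [List.foldl_cons]
    have h1 := ih (piles.modify (pvDigit pos x).toNat (fun b => b ++ [x])) (by simp [hlen])
    have h2 : (piles.modify (pvDigit pos x).toNat (fun b => b ++ [x])).flatten.Perm (piles.flatten ++ [x]) :=
      pv_flatten_modify x piles _ (by rw [hlen]; exact pv_digit_lt pos x)
    have h3 := h1.trans (h2.append_right t)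
    simpa [List.append_assoc] using h3

-- the lengths of the piles built from L are exactly pvCounts L
theorem pv_piles_lengths (pos : Int) (L : List Int) :
    (L.foldl (fun piles x => piles.modify (pvDigit pos x).toNat (fun b => b ++ [x]))
        ((List.range 10).map (fun _ => ([] : List Int)))).map (fun p => (p.length : Int))
      = pvCounts L pos := by
  unfold pvCounts
  have key : ∀ (piles : List (List Int)),
      (L.foldl (fun piles x => piles.modify (pvDigit pos x).toNat (fun b => b ++ [x])) piles).map
          (fun p => (p.length : Int))
        = L.foldl (fun c x => c.modify (pvDigit pos x).toNat (· + 1))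
            (piles.map (fun p => (p.length : Int))) := by
    induction L with
    | nil => intro piles; rfl
    | cons x t ih =>
      intro piles
      simp only [List.foldl_cons]
      rw [ih]
      congr 1
      exact pv_map_modify (fun p => ((p.length : Int))) (fun b => b ++ [x]) (· + 1)
        (by intro a; simp) piles (pvDigit pos x).toNat
  rw [key]
  congr 1

-- main invariant of A's outer fold
theorem pv_main (numbers : List Int) :
    ∀ (ps : List Int) (hist : List (List Int)) (L : List Int), L.Perm numbers →
      (ps.foldl
        (fun (st : List (List Int) × List Int) pos =>
          let piles : List (List Int) := (List.range 10).map (fun _ => [])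
          let piles := st.2.foldl
            (fun piles x => piles.modify (pvDigit pos x).toNat (fun b => b ++ [x])) piles
          (st.1 ++ [piles.map (fun p => (p.length : Int))], piles.flatten))
        (hist, L)).1 = hist ++ ps.map (pvCounts numbers) := by
  intro ps
  induction ps with
  | nil => intro hist L _; simp
  | cons pos t ih =>
    intro hist L hp
    simp only [List.foldl_cons, List.map_cons]
    have hlens := pv_piles_lengths pos L
    have hflat : (L.foldl (fun piles x => piles.modify (pvDigit pos x).toNat (fun b => b ++ [x]))
        ((List.range 10).map (fun _ => ([] : List Int)))).flatten.Perm numbers := by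
      have := pv_piles_flatten pos L ((List.range 10).map (fun _ => ([] : List Int))) (by simp)
      simpa using this.trans hp
    rw [ih _ _ hflat]
    rw [hlens, pv_counts_perm pos hp]
    simp

-- ===== VERDICT (by name: the statement is the Claim_ definition above) =====
theorem simulate_radix_piles_decimal_spec : Claim_equal_simulate_radix_piles_decimal := by
  intro numbers d _
  unfold Spec_simulate_radix_piles_decimal simulate_radix_piles_decimal simulate_radix_piles_decimal_alt
  simpa using pv_main numbers (PySem.List.pyRange 0 d 1) [] numbers (List.Perm.refl _)
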